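-- pv_equiv track=rewrite | github.com/apalaciosc/Codewars | ej10.py | men_from_boys
-- ===== SOURCE A (Python) =====
-- def men_from_boys(arr):
-- 	#your code here
-- 	par=[]
-- 	impar=[]
-- 	final=[]
-- 	for x in arr:
-- 		if x%2==0:
-- 			par.append(x)
-- 		else:
-- 			impar.append(x)
-- 	par=list(set(par))  #Eliminar repetidos
-- 	impar=list(set(impar))  #Eliminar repetidos
-- 	par.sort()  #ordenar ascendente
-- 	impar.sort(reverse=True) #ordenar descendente
-- 	final=par+impar
-- 	return final
-- ===== SOURCE B (Python) =====
-- def men_from_boys(arr):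
--     asc = sorted(set(arr))
--     evens = [x for x in asc if x % 2 == 0]
--     odds = [x for x in reversed(asc) if x % 2 != 0]
--     return evens + odds
-- ===== Notes on version B (the rewrite author's own statement) =====
-- stated objective: simpler
-- what changed: B sorts the deduplicated union once and extracts evens forward / odds backward from that single sorted list, instead of partitioning into two buckets and sorting each separately as A does.
import Mathlib
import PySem

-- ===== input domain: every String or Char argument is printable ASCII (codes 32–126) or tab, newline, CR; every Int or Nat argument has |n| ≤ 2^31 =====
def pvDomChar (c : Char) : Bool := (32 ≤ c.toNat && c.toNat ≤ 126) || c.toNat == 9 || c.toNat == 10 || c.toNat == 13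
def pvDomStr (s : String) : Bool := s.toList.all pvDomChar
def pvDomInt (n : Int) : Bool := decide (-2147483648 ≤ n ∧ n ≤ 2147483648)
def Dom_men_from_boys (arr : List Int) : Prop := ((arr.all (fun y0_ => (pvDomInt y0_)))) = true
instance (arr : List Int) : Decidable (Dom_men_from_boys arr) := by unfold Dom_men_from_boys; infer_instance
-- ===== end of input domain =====

-- B changes the decomposition: one sort of the deduplicated union with two directional
-- parity filters, instead of A's partition-then-sort-each-bucket; same cost, simpler.

-- ===== PORT A =====
-- the partition loop: par/impar built by appending, as in A's for-loop
def men_from_boys (arr : List Int) : List Int :=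
  -- for x in arr: append to par (even) or impar (odd)
  let pi := arr.foldl
    (fun (s : List Int × List Int) x =>
      if PySem.Int.mod x 2 = 0 then (s.1 ++ [x], s.2) else (s.1, s.2 ++ [x]))
    ([], [])
  -- par = list(set(par)); par.sort()  — sorted without a key on a Set: order-independent
  let par := PySem.List.sorted (PySem.Set.ofList pi.1) (fun x => x) false
  -- impar = list(set(impar)); impar.sort(reverse=True)
  let impar := PySem.List.sorted (PySem.Set.ofList pi.2) (fun x => x) true
  par ++ impar

-- ===== PORT B =====
def men_from_boys_alt (arr : List Int) : List Int :=
  let asc := PySem.List.sorted (PySem.Set.ofList arr) (fun x => x) false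
  asc.filter (fun x => decide (PySem.Int.mod x 2 = 0))
    ++ asc.reverse.filter (fun x => decide (PySem.Int.mod x 2 ≠ 0))

-- ===== PRECONDITION & SPEC =====
def Spec_men_from_boys (arr : List Int) (out : List Int) : Prop := out = men_from_boys_alt arr
instance (arr : List Int) (out : List Int) : Decidable (Spec_men_from_boys arr out) := by unfold Spec_men_from_boys; infer_instance

-- ===== CLAIM (what is proved, stated in full; the proofs are below) =====
def Claim_equal_men_from_boys : Prop := ∀ (arr : List Int), Dom_men_from_boys arr → Spec_men_from_boys arr (men_from_boys arr)

-- ===== LEMMAS AND PROOFS =====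

-- the partition loop computes the two parity filters of arr (appended to the accumulators)
theorem pv_partition_eq (arr p i : List Int) :
    arr.foldl
      (fun (s : List Int × List Int) x =>
        if PySem.Int.mod x 2 = 0 then (s.1 ++ [x], s.2) else (s.1, s.2 ++ [x]))
      (p, i)
    = (p ++ arr.filter (fun x => decide (PySem.Int.mod x 2 = 0)),
       i ++ arr.filter (fun x => decide (PySem.Int.mod x 2 ≠ 0))) := by
  induction arr generalizing p i with
  | nil => simp
  | cons a t ih =>
    have hm : PySem.Int.mod a 2 = a % 2 := PySem.Int.mod_eq_emod_of_pos (by norm_num)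
    by_cases h : PySem.Int.mod a 2 = 0
    · rw [List.foldl_cons, if_pos h, ih]
      rw [hm] at h
      simp [List.filter_cons, List.append_assoc]
      omega
    · rw [List.foldl_cons, if_neg h, ih]
      rw [hm] at h
      simp [List.filter_cons, List.append_assoc]
      omega

-- sorting the deduplicated parity-filter equals filtering the sorted deduplicated union
theorem pv_sorted_filter (arr : List Int) (q : Int → Bool) :
    PySem.List.sorted (PySem.Set.ofList (arr.filter q)) (fun x => x) false
    = (PySem.List.sorted (PySem.Set.ofList arr) (fun x => x) false).filter q := by
  have hns : (PySem.List.sorted (PySem.Set.ofList arr) (fun x => x) false).Nodup :=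
    ((PySem.List.sorted_perm (PySem.Set.ofList arr) (fun x => x) false).symm).nodup
      (PySem.Set.nodup_ofList arr)
  apply PySem.List.sorted_eq_of_perm_of_pairwise_lt
  · exact (List.perm_ext_iff_of_nodup (List.Nodup.filter q hns)
        (PySem.Set.nodup_ofList _)).mpr
      (by intro x; simp [List.mem_filter, PySem.List.mem_sorted, PySem.Set.mem_ofList, And.comm])
  · exact List.Pairwise.filter q (PySem.List.sorted_ofList_pairwise_lt arr)

theorem men_from_boys_eq (arr : List Int) : men_from_boys arr = men_from_boys_alt arr := by
  unfold men_from_boys men_from_boys_alt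
  rw [pv_partition_eq]
  simp only [List.nil_append]
  congr 1
  · exact pv_sorted_filter arr _
  · -- odds: reverse=True sort equals reversed-ascending filter
    have hns : (PySem.List.sorted (PySem.Set.ofList arr) (fun x => x) false).Nodup :=
      ((PySem.List.sorted_perm (PySem.Set.ofList arr) (fun x => x) false).symm).nodup
        (PySem.Set.nodup_ofList arr)
    apply PySem.List.sorted_rev_eq_of_perm_of_pairwise_gt
    · exact (List.perm_ext_iff_of_nodup (List.Nodup.filter _ (List.nodup_reverse.mpr hns))
          (PySem.Set.nodup_ofList _)).mpr
        (by intro x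
            simp [List.mem_filter, List.mem_reverse, PySem.List.mem_sorted,
              PySem.Set.mem_ofList])
    · exact List.Pairwise.filter _
        (List.pairwise_reverse.mpr (PySem.List.sorted_ofList_pairwise_lt arr))

-- ===== VERDICT (by name: the statement is the Claim_ definition above) =====
theorem men_from_boys_spec : Claim_equal_men_from_boys := by
  intro arr _
  exact men_from_boys_eq arr
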